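-- pv_equiv track=rewrite | github.com/selmiss/MuMo | train/multi_gpus.py | split_batches_for_devices
-- ===== SOURCE A (Python) =====
-- import math
--
-- def split_batches_for_devices(batch_list, num_devices):
--     """Split input_ids, attention_mask, and graph_data into N parts."""
--     # Calculate batch size per device
--     total_batches = len(batch_list)
--     batches_per_device = math.ceil(total_batches / num_devices)
--
--     # Split batches into sub-batches for each device
--     sub_batches = []
--     for i in range(num_devices):
--         start_idx = i * batches_per_device
--         end_idx = min((i + 1) * batches_per_device, total_batches)
--
--         if start_idx >= total_batches:
--             # Add empty batch if we've run out of data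
--             sub_batches.append([])
--             continue
--
--         device_batch = batch_list[start_idx:end_idx]
--
--         sub_batches.append(device_batch)
--
--     return sub_batches
-- ===== SOURCE B (Python) =====
-- import math
--
-- def split_batches_for_devices(batch_list, num_devices):
--     """Split input_ids, attention_mask, and graph_data into N parts."""
--     per = math.ceil(len(batch_list) / num_devices)
--     buckets = {}
--     if per > 0:
--         for j, x in enumerate(batch_list):
--             buckets.setdefault(j // per, []).append(x)
--     return [buckets.get(i, []) for i in range(num_devices)]
-- ===== Notes on version B (the rewrite author's own statement) =====
-- stated objective: alternative
-- what changed: B builds a dict grouping each element by its device key j // per in one pass over the data (setdefault/append), then reads the per-device sub-batches out of the dict with buckets.get(i, []), instead of A's per-device start/end index arithmetic and slicing.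
import Mathlib
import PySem

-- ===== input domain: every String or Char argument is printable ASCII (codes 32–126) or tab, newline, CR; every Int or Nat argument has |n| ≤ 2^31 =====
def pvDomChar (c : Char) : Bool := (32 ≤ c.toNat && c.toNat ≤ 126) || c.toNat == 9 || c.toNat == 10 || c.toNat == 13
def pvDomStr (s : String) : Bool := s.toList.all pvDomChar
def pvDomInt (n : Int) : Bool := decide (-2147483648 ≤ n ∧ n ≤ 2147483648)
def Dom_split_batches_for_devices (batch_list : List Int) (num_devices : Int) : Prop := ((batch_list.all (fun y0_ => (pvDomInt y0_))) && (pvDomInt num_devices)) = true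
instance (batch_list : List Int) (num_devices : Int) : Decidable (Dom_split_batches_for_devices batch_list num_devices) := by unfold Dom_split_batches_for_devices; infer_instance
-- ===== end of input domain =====

-- B groups each element into a dict bucket keyed by j // per in one pass (setdefault/append),
-- then reads the per-device sub-batches out of the dict, instead of A's per-device
-- start/end index arithmetic and slicing (objective: alternative).


-- ===== PORT A =====
-- math.ceil(total / num_devices): exact as integer ceiling division -((-total) // num_devices)
-- for the |int| ≤ 2^31 domain (the float quotient is exact enough there); the `num_devices = 0`
-- guard marks Python's ZeroDivisionError, excluded by Pre_ below.
def split_batches_for_devices (batch_list : List Int) (num_devices : Int) : List (List Int) :=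
  let total : Int := batch_list.length
  let per : Int := if num_devices = 0 then 0 else -(PySem.Int.floordiv (-total) num_devices)
  (PySem.List.pyRange 0 num_devices 1).foldl
    (fun sub i =>
      let startIdx := i * per
      let endIdx := min ((i + 1) * per) total
      if startIdx ≥ total then sub ++ [([] : List Int)]
      else sub ++ [PySem.List.slice batch_list (some startIdx) (some endIdx)]) []

-- ===== PORT B =====
-- buckets.setdefault(j // per, []).append(x) is PySem.Dict.modify key [] (· ++ [x]);
-- j // per is PySem.Int.floordiv.
def split_batches_for_devices_alt (batch_list : List Int) (num_devices : Int) : List (List Int) :=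
  let total : Int := batch_list.length
  let per : Int := if num_devices = 0 then 0 else -(PySem.Int.floordiv (-total) num_devices)
  let buckets : PySem.Dict Int (List Int) :=
    if 0 < per then
      (PySem.List.enumerate batch_list 0).foldl
        (fun d jx => d.modify (PySem.Int.floordiv jx.1 per) [] (fun b => b ++ [jx.2]))
        PySem.Dict.empty
    else PySem.Dict.empty
  (PySem.List.pyRange 0 num_devices 1).map (fun i => buckets.getD i [])

-- ===== PRECONDITION & SPEC =====
-- Pre_ excludes exactly num_devices = 0, where both Pythons raise ZeroDivisionError.
def Pre_split_batches_for_devices (batch_list : List Int) (num_devices : Int) : Prop := num_devices ≠ 0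
instance (batch_list : List Int) (num_devices : Int) : Decidable (Pre_split_batches_for_devices batch_list num_devices) := by unfold Pre_split_batches_for_devices; infer_instance
def pvWitness_split_batches_for_devices : List Int × Int := ([1, 2, 3, 4, 5], 2)
def Spec_split_batches_for_devices (batch_list : List Int) (num_devices : Int) (out : List (List Int)) : Prop := out = split_batches_for_devices_alt batch_list num_devices
instance (batch_list : List Int) (num_devices : Int) (out : List (List Int)) : Decidable (Spec_split_batches_for_devices batch_list num_devices out) := by unfold Spec_split_batches_for_devices; infer_instance

-- ===== CLAIM (what is proved, stated in full; the proofs are below) =====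
def Claim_equal_split_batches_for_devices : Prop := ∀ (batch_list : List Int) (num_devices : Int), Dom_split_batches_for_devices batch_list num_devices → Pre_split_batches_for_devices batch_list num_devices → Spec_split_batches_for_devices batch_list num_devices (split_batches_for_devices batch_list num_devices)

-- ===== LEMMAS AND PROOFS =====

-- A's loop body as a map over the device indices.
theorem A_as_map (batch_list : List Int) (num_devices : Int) :
    split_batches_for_devices batch_list num_devices =
    (PySem.List.pyRange 0 num_devices 1).map
      (fun i =>
        let per : Int := if num_devices = 0 then 0 else -(PySem.Int.floordiv (-(batch_list.length : Int)) num_devices)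
        if i * per ≥ (batch_list.length : Int) then ([] : List Int)
        else PySem.List.slice batch_list (some (i * per)) (some (min ((i + 1) * per) (batch_list.length : Int)))) := by
  unfold split_batches_for_devices
  have hfun : (fun (sub : List (List Int)) (i : Int) =>
      let startIdx := i * (if num_devices = 0 then 0 else -(PySem.Int.floordiv (-(batch_list.length : Int)) num_devices))
      let endIdx := min ((i + 1) * (if num_devices = 0 then 0 else -(PySem.Int.floordiv (-(batch_list.length : Int)) num_devices))) (batch_list.length : Int)
      if startIdx ≥ (batch_list.length : Int) then sub ++ [([] : List Int)]
      else sub ++ [PySem.List.slice batch_list (some startIdx) (some endIdx)]) =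
      (fun (sub : List (List Int)) (i : Int) => sub ++
        [if i * (if num_devices = 0 then 0 else -(PySem.Int.floordiv (-(batch_list.length : Int)) num_devices)) ≥ (batch_list.length : Int) then ([] : List Int)
         else PySem.List.slice batch_list (some (i * (if num_devices = 0 then 0 else -(PySem.Int.floordiv (-(batch_list.length : Int)) num_devices))))
              (some (min ((i + 1) * (if num_devices = 0 then 0 else -(PySem.Int.floordiv (-(batch_list.length : Int)) num_devices))) (batch_list.length : Int)))]) := by
    funext sub i
    by_cases h : i * (if num_devices = 0 then 0 else -(PySem.Int.floordiv (-(batch_list.length : Int)) num_devices)) ≥ (batch_list.length : Int)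
    · rw [if_pos h, if_pos h]
    · rw [if_neg h, if_neg h]
  simp only [hfun, PySem.List.foldl_append_singleton_eq_map, List.nil_append]

-- Filtering the enumeration of xs by an index interval [a, b) picks out a contiguous slice.
theorem filter_enumerate_interval (xs : List Int) : ∀ (s a b : Int),
    ((PySem.List.enumerate xs s).filter (fun jx => decide (a ≤ jx.1) && decide (jx.1 < b))).map (·.2)
    = (xs.drop (a - s).toNat).take (b - max a s).toNat := by
  induction xs with
  | nil => intro s a b; simp [PySem.List.enumerate_nil]
  | cons x xs ih =>
    intro s a b
    rw [PySem.List.enumerate_cons, List.filter_cons]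
    by_cases ha : a ≤ s
    · have hdrop : (a - s).toNat = 0 := by omega
      by_cases hb : s < b
      · have : (decide (a ≤ (s, x).1) && decide ((s, x).1 < b)) = true := by simp [ha, hb]
        rw [this]
        simp only [reduceIte]
        rw [List.map_cons, ih (s + 1) a b, hdrop]
        have h1 : (a - (s + 1)).toNat = 0 := by omega
        have h2 : max a (s + 1) = s + 1 := by omega
        have h3 : max a s = s := by omega
        have h4 : (b - s).toNat = (b - (s + 1)).toNat + 1 := by omega
        rw [h1, h2, h3, h4]
        simp
      · have : (decide (a ≤ (s, x).1) && decide ((s, x).1 < b)) = false := by simp [hb]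
        rw [this, if_neg Bool.false_ne_true, ih (s + 1) a b]
        have h2 : (b - max a (s + 1)).toNat = 0 := by omega
        have h3 : (b - max a s).toNat = 0 := by omega
        rw [h2, h3]
        simp
    · have : (decide (a ≤ (s, x).1) && decide ((s, x).1 < b)) = false := by simp [ha]
      rw [this, if_neg Bool.false_ne_true, ih (s + 1) a b]
      have h1 : max a (s + 1) = max a s := by omega
      have h2 : (a - s).toNat = (a - (s + 1)).toNat + 1 := by omega
      rw [h1, h2]
      simp

theorem main_equal (batch_list : List Int) (num_devices : Int)
    (hn : num_devices ≠ 0) :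
    split_batches_for_devices batch_list num_devices =
    split_batches_for_devices_alt batch_list num_devices := by
  rw [A_as_map]
  unfold split_batches_for_devices_alt
  simp only [if_neg hn]
  set L : Int := (batch_list.length : Int) with hL
  have hL0 : 0 ≤ L := hL ▸ Int.natCast_nonneg _
  set per : Int := -(PySem.Int.floordiv (-L) num_devices) with hper
  apply List.map_congr_left
  intro i hi
  have hib := (PySem.List.mem_pyRange_one).mp hi
  have hpos : 0 < num_devices := by omega
  have hb := (PySem.Int.neg_floordiv_neg_eq_iff_of_pos (a := L) (b := num_devices) hpos).mp hper.symm
  by_cases hperpos : 0 < per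
  · -- data present: bucket i of the dict is exactly A's slice for device i
    rw [if_pos hperpos]
    have hfold : (PySem.List.enumerate batch_list 0).foldl
        (fun d jx => d.modify (PySem.Int.floordiv jx.1 per) [] (fun b => b ++ [jx.2]))
        PySem.Dict.empty =
        ((PySem.List.enumerate batch_list 0).map
          (fun jx => (PySem.Int.floordiv jx.1 per, jx.2))).foldl
        (fun d p => d.modify p.1 [] (fun b => b ++ [p.2])) PySem.Dict.empty := by
      rw [List.foldl_map]
    rw [hfold, PySem.Dict.getD_foldl_modify_append, PySem.Dict.getD_empty, List.nil_append,
        List.filter_map, List.map_map]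
    have hfilt : ((PySem.List.enumerate batch_list 0).filter
        ((fun p => p.1 == i) ∘ fun jx => (PySem.Int.floordiv jx.1 per, jx.2))) =
        ((PySem.List.enumerate batch_list 0).filter
          (fun jx => decide (i * per ≤ jx.1) && decide (jx.1 < (i + 1) * per))) := by
      apply List.filter_congr
      intro jx _
      simp only [Function.comp_apply]
      rw [Bool.eq_iff_iff]
      simp only [beq_iff_eq, Bool.and_eq_true, decide_eq_true_eq]
      rw [PySem.Int.floordiv_eq_iff_of_pos hperpos]
    have hmap2 : ((PySem.List.enumerate batch_list 0).filter
          (fun jx => decide (i * per ≤ jx.1) && decide (jx.1 < (i + 1) * per))).map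
          ((fun p => p.2) ∘ fun jx => (PySem.Int.floordiv jx.1 per, jx.2)) =
        ((PySem.List.enumerate batch_list 0).filter
          (fun jx => decide (i * per ≤ jx.1) && decide (jx.1 < (i + 1) * per))).map (·.2) := by
      apply List.map_congr_left; intro jx _; rfl
    rw [hfilt, hmap2, filter_enumerate_interval batch_list 0 (i * per) ((i + 1) * per)]
    have hi0 : 0 ≤ i * per := mul_nonneg hib.1 (le_of_lt hperpos)
    have hmax : max (i * per) 0 = i * per := max_eq_left hi0
    rw [hmax, (by ring : (i + 1) * per - i * per = per)]
    simp only [sub_zero]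
    by_cases hrun : i * per ≥ L
    · rw [if_pos hrun]
      rw [List.drop_eq_nil_of_le (by omega)]
      simp
    · rw [if_neg hrun]
      rw [PySem.List.slice_toNat batch_list hi0 (le_min (by nlinarith) hL0)]
      rw [List.take_eq_take_iff]
      simp only [List.length_drop]
      have hexp : (i + 1) * per = i * per + per := by ring
      omega
  · -- per ≤ 0 with num_devices > 0 forces an empty batch list: every bucket is empty
    rw [if_neg hperpos, PySem.Dict.getD_empty]
    have hLz : L = 0 := by nlinarith [hb.2, hib.1]
    rw [if_pos (by nlinarith [hib.1, hb.1])]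

-- ===== VERDICT (by name: the statement is the Claim_ definition above) =====
theorem split_batches_for_devices_spec : Claim_equal_split_batches_for_devices := by
  intro batch_list num_devices _ hpre
  unfold Spec_split_batches_for_devices
  exact main_equal batch_list num_devices hpre
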